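-- pv_equiv track=rewrite | github.com/Linaro/hcqc | command/metric/height/height999.py | cut_load_term
-- ===== SOURCE A (Python) =====
-- def cut_load_term(term_a_list):
--     first_p = True
--     first_a_list = []
--     second_a_list = []
--     for term in term_a_list:
--         (tag, item) = term
--         if tag == 'AS':
--             first_p = False
--             second_a_list.append(term)
--         elif first_p:
--             first_a_list.append(term)
--         else:
--             second_a_list.append(term)
--     return (first_a_list, second_a_list)
-- ===== SOURCE B (Python) =====
-- def cut_load_term(term_a_list):
--     for i, (tag, item) in enumerate(term_a_list):
--         if tag == 'AS':
--             return (term_a_list[:i], term_a_list[i:])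
--     return (list(term_a_list), [])
-- ===== Notes on version B (the rewrite author's own statement) =====
-- stated objective: simpler
-- what changed: Replaces the flag-and-two-accumulators loop with finding the index of the first 'AS' term and slicing the list there.
import Mathlib
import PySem

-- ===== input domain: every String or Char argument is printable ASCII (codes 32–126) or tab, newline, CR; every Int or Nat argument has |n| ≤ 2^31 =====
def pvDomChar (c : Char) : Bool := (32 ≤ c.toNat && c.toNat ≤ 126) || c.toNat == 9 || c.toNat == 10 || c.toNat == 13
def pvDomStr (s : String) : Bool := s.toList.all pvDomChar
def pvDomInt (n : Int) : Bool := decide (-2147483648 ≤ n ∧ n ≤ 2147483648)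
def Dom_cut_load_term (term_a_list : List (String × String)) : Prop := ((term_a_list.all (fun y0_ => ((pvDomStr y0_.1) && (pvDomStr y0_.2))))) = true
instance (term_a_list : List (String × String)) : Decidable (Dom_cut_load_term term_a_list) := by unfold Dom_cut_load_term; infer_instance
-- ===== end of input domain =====

-- B finds the index of the first 'AS' term and slices there, instead of A's flag with two accumulators (objective: simpler).
-- ===== PORT A =====
-- the loop body of A: state = (first_p, first_a_list, second_a_list)
def pvStepA (s : Bool × List (String × String) × List (String × String)) (term : String × String) :
    Bool × List (String × String) × List (String × String) :=
  if term.1 == "AS" then (false, s.2.1, s.2.2 ++ [term])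
  else if s.1 then (s.1, s.2.1 ++ [term], s.2.2)
  else (s.1, s.2.1, s.2.2 ++ [term])

def cut_load_term (term_a_list : List (String × String)) : (List (String × String)) × (List (String × String)) :=
  let r := term_a_list.foldl pvStepA (true, [], [])
  (r.2.1, r.2.2)

-- ===== PORT B =====
-- the for-enumerate loop of B: walks the list with the running index, returns the split at the first 'AS'
def pvGoB (full : List (String × String)) : List (String × String) → Nat → (List (String × String)) × (List (String × String))
  | [], _ => (full, [])
  | t :: ts, i => if t.1 == "AS" then (full.take i, full.drop i) else pvGoB full ts (i + 1)

def cut_load_term_alt (term_a_list : List (String × String)) : (List (String × String)) × (List (String × String)) :=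
  pvGoB term_a_list term_a_list 0

-- ===== PRECONDITION & SPEC =====
def Spec_cut_load_term (term_a_list : List (String × String)) (out : (List (String × String)) × (List (String × String))) : Prop := out = cut_load_term_alt term_a_list
instance (term_a_list : List (String × String)) (out : (List (String × String)) × (List (String × String))) : Decidable (Spec_cut_load_term term_a_list out) := by unfold Spec_cut_load_term; infer_instance

-- ===== CLAIM (what is proved, stated in full; the proofs are below) =====
def Claim_equal_cut_load_term : Prop := ∀ (term_a_list : List (String × String)), Dom_cut_load_term term_a_list → Spec_cut_load_term term_a_list (cut_load_term term_a_list)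

-- ===== LEMMAS AND PROOFS =====

lemma pvFoldA_false : ∀ (xs : List (String × String)) f s,
    List.foldl pvStepA (false, f, s) xs = (false, f, s ++ xs) := by
  intro xs
  induction xs with
  | nil => simp
  | cons t ts ih =>
    intro f s
    simp only [List.foldl_cons, pvStepA]
    by_cases h : t.1 == "AS" <;> simp [h, ih]

lemma pvMain_aux : ∀ (rest pre : List (String × String)),
    (let r := List.foldl pvStepA (true, pre, []) rest; (r.2.1, r.2.2))
      = pvGoB (pre ++ rest) rest pre.length := by
  intro rest
  induction rest with
  | nil => intro pre; simp [pvGoB]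
  | cons t ts ih =>
    intro pre
    simp only [List.foldl_cons, pvStepA, pvGoB]
    by_cases h : t.1 == "AS"
    · simp only [h, if_true]
      rw [pvFoldA_false]
      simp
    · simp only [h, if_false, Bool.false_eq_true]
      have := ih (pre ++ [t])
      simpa using this

-- ===== VERDICT (by name: the statement is the Claim_ definition above) =====
theorem cut_load_term_spec : Claim_equal_cut_load_term := by
  intro xs _
  unfold Spec_cut_load_term cut_load_term cut_load_term_alt
  have := pvMain_aux xs []
  simpa using this
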